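-- pv_equiv track=rewrite | github.com/TristenHarr/StartingOut | MathItUp.py | polyspand
-- ===== SOURCE A (Python) =====
-- from itertools import cycle
--
-- def polyspand(x):
--     my_stuff = []
--     valuecount = -1
--     my_letters = cycle("ABCDEFGHIJKLMNOPQRSTUVWXYZ")
--     for i in range(x+1):
--         value = next(my_letters)
--         if value == "A":
--             valuecount += 1
--         if valuecount > 0:
--             my_stuff.append((value + ("'"*valuecount))+"^")
--         else:
--             my_stuff.append((value+"^"))
--     return ["".join(my_stuff), x+1]
-- ===== SOURCE B (Python) =====
-- def polyspand(x):
--     n = x + 1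
--     q, r = divmod(n, 26) if n > 0 else (0, 0)
--     pieces = []
--     for p in range(q):
--         suf = "'" * p + "^"
--         pieces.append(suf.join("ABCDEFGHIJKLMNOPQRSTUVWXYZ") + suf)
--     if r:
--         suf = "'" * q + "^"
--         pieces.append(suf.join("ABCDEFGHIJKLMNOPQRSTUVWXYZ"[:r]) + suf)
--     return ["".join(pieces), n]
-- ===== Notes on version B (the rewrite author's own statement) =====
-- stated objective: alternative
-- what changed: A walks the whole range element by element with a cycle iterator and a counter bumped each time the cycle wraps to 'A'; B computes the block count and remainder by a single divmod by 26 up front and assembles the string block-wise, building each prime-level block in one shot as a separator-join of the alphabet (suf.join(ALPHA) + suf) plus a partial block for the remainder.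
import Mathlib
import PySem

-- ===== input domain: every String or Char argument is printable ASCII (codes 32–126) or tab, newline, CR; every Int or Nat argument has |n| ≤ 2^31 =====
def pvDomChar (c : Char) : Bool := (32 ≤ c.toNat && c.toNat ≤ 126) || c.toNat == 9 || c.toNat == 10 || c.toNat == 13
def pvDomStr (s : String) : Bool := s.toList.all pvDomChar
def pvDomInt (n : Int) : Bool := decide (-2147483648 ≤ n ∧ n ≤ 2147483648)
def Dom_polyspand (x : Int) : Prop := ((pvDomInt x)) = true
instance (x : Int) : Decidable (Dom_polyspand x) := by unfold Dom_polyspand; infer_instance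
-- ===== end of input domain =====

-- B replaces A's stateful element-by-element pass (cycle iterator + wraparound counter) by a
-- closed-form divmod(x+1, 26) that fixes the number of full blocks and the remainder up front,
-- and then builds each block in one shot as a separator-join of the alphabet; objective:
-- alternative decomposition, same cost. Strings are List Char (PySem convention).

-- ===== PORT A =====
def pvLetters : List Char := "ABCDEFGHIJKLMNOPQRSTUVWXYZ".toList

-- loop body of A's for-loop; state = (my_stuff, valuecount, cycle position)
def pvStepA (st : List (List Char) × Int × Nat) (_i : Int) : List (List Char) × Int × Nat :=
  let value := pvLetters.getD st.2.2 'A'          -- value = next(my_letters)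
  let valuecount := if value = 'A' then st.2.1 + 1 else st.2.1
  let my_stuff :=
    if valuecount > 0 then
      st.1 ++ [[value] ++ List.replicate valuecount.toNat '\'' ++ ['^']]
    else
      st.1 ++ [[value] ++ ['^']]
  (my_stuff, valuecount, (st.2.2 + 1) % 26)       -- cycle advances

def polyspand (x : Int) : String × Int :=
  let st := (PySem.List.pyRange 0 (x + 1) 1).foldl pvStepA ([], -1, 0)
  (String.ofList (PySem.Chars.join [] st.1), x + 1)

-- ===== PORT B =====
-- suf = "'" * p + "^"  (Python's s * p is the empty string for p ≤ 0; Int.toNat matches exactly)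
def pvSuffixB (p : Int) : List Char := List.replicate p.toNat '\'' ++ ['^']

-- suf.join(cs) + suf
def pvJoinEnd (suf cs : List Char) : List Char :=
  PySem.Chars.join suf (cs.map (fun c => [c])) ++ suf

def polyspand_alt (x : Int) : String × Int :=
  let n := x + 1
  -- q, r = divmod(n, 26) if n > 0 else (0, 0)
  let qr := if n > 0 then (PySem.Int.floordiv n 26, PySem.Int.mod n 26) else ((0 : Int), (0 : Int))
  -- for p in range(q): pieces.append(suf.join(ALPHA) + suf)
  let pieces := (PySem.List.pyRange 0 qr.1 1).map (fun p => pvJoinEnd (pvSuffixB p) pvLetters)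
  -- if r: pieces.append(suf.join(ALPHA[:r]) + suf)   (0 ≤ r < 26, so ALPHA[:r] = take r.toNat,
  -- exact by PySem.List.slice_to)
  let pieces := if qr.2 ≠ 0 then pieces ++ [pvJoinEnd (pvSuffixB qr.1) (pvLetters.take qr.2.toNat)]
                else pieces
  (String.ofList (PySem.Chars.join [] pieces), n)

-- ===== PRECONDITION & SPEC =====
def Spec_polyspand (x : Int) (out : String × Int) : Prop := out = polyspand_alt x
instance (x : Int) (out : String × Int) : Decidable (Spec_polyspand x out) := by unfold Spec_polyspand; infer_instance

-- ===== CLAIM =====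
def Claim_equal_polyspand : Prop := ∀ (x : Int), Dom_polyspand x → Spec_polyspand x (polyspand x)

-- ===== LEMMAS AND PROOFS =====

-- the i-th emitted element, in both programs
def pvPart (i : Nat) : List Char :=
  [pvLetters.getD (i % 26) 'A'] ++ List.replicate (i / 26) '\'' ++ ['^']

-- A's loop state after k iterations
def pvStA (k : Nat) : List (List Char) × Int × Nat :=
  ((List.range' 0 k).map pvPart, ((k + 25) / 26 : Nat) - 1, k % 26)

theorem pvLetters_A_iff (j : Nat) (hj : j < 26) :
    (pvLetters.getD j 'A' = 'A') ↔ j = 0 := by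
  interval_cases j <;> simp [pvLetters]

theorem pvStepA_stA (k : Nat) : pvStepA (pvStA k) 0 = pvStA (k + 1) := by
  have hlt : k % 26 < 26 := Nat.mod_lt _ (by omega)
  simp only [pvStepA, pvStA]
  rw [if_congr (pvLetters_A_iff (k % 26) hlt) rfl rfl]
  have hvc : (if k % 26 = 0 then ((k + 25) / 26 : Nat) - (1 : Int) + 1
      else ((k + 25) / 26 : Nat) - 1) = ((k / 26 : Nat) : Int) := by
    split <;> rename_i h
    · have e : (k + 25) / 26 = k / 26 := by omega
      rw [e]; ring
    · have e : (k + 25) / 26 = k / 26 + 1 := by omega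
      rw [e]; push_cast; ring
  rw [hvc]
  have hvc2 : ((k + 1 + 25) / 26 : Nat) - (1 : Int) = ((k / 26 : Nat) : Int) := by
    have : (k + 26) / 26 = k / 26 + 1 := by omega
    rw [show k + 1 + 25 = k + 26 from rfl, this]; push_cast; omega
  refine Prod.ext ?_ (Prod.ext ?_ ?_)
  · show _ = (List.range' 0 (k + 1)).map pvPart
    rw [List.range'_concat]
    simp only [List.map_append, List.map_cons, List.map_nil, Nat.zero_add, Nat.one_mul]
    split <;> rename_i hpos
    · simp only [pvPart, List.append_cancel_left_eq, List.cons.injEq]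
      exact ⟨by congr 1, trivial⟩
    · have h0 : k / 26 = 0 := by omega
      simp [pvPart, h0]
  · exact hvc2.symm
  · show (k % 26 + 1) % 26 = (k + 1) % 26
    omega

theorem pvFoldA (l : List Int) (k : Nat) :
    l.foldl pvStepA (pvStA k) = pvStA (k + l.length) := by
  induction l generalizing k with
  | nil => simp
  | cons a l ih =>
    have h1 : pvStepA (pvStA k) a = pvStA (k + 1) := by
      have := pvStepA_stA k
      simpa [pvStepA] using this
    simp only [List.foldl_cons, h1, ih, List.length_cons]
    congr 1
    omega

-- "".join(l) is flatten
theorem pvJoin_nil_flatten (l : List (List Char)) :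
    PySem.Chars.join [] l = l.flatten := by
  match l with
  | [] => simp [PySem.Chars.join_nil]
  | [p] => simp [PySem.Chars.join_singleton]
  | p :: q :: rest =>
    rw [PySem.Chars.join_cons_cons, pvJoin_nil_flatten (q :: rest)]
    simp

-- suf.join(cs) + suf sticks suf after EVERY letter (cs nonempty)
theorem pvJoinEnd_flatten (suf : List Char) (cs : List Char) (h : cs ≠ []) :
    pvJoinEnd suf cs = (cs.map (fun c => [c] ++ suf)).flatten := by
  match cs with
  | [] => exact absurd rfl h
  | [c] => simp [pvJoinEnd, PySem.Chars.join_singleton]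
  | c :: d :: rest =>
    have ih := pvJoinEnd_flatten suf (d :: rest) (by simp)
    simp only [pvJoinEnd, List.map_cons] at ih ⊢
    rw [PySem.Chars.join_cons_cons]
    simp only [List.flatten_cons, ← ih]
    simp

-- one block at prime level p is exactly parts 26p … 26p+m-1
theorem pvBlock_parts (p m : Nat) (hm : m ≤ 26) :
    (pvLetters.take m).map (fun c => [c] ++ (List.replicate p '\'' ++ ['^'])) =
      (List.range' (26 * p) m).map pvPart := by
  apply List.ext_getElem
  · simp [pvLetters]; omega
  · intro i h1 h2
    have him : i < m := by simpa using h2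
    have hi26 : i < 26 := by omega
    have hilen : i < pvLetters.length := by simpa [pvLetters] using hi26
    simp only [List.getElem_map, List.getElem_take, List.getElem_range']
    simp only [pvPart]
    have e1 : (26 * p + 1 * i) % 26 = i := by omega
    have e2 : (26 * p + 1 * i) / 26 = p := by omega
    rw [e1, e2]
    simp [List.getD, List.getElem?_eq_getElem hilen]

-- concatenating the q full blocks and the remainder gives all n = 26q + r parts
theorem pvParts_concat (q r : Nat) :
    ((List.range q).map (fun k => ((List.range' (26 * k) 26).map pvPart).flatten)).flatten
      ++ ((List.range' (26 * q) r).map pvPart).flatten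
      = ((List.range' 0 (26 * q + r)).map pvPart).flatten := by
  induction q generalizing r with
  | zero => simp
  | succ q ih =>
    rw [List.range_succ]
    simp only [List.map_append, List.map_cons, List.map_nil, List.flatten_append,
      List.flatten_cons, List.flatten_nil, List.append_nil]
    have hsplit : (List.range' (26 * q) 26).map pvPart ++ (List.range' (26 * q + 26) r).map pvPart
        = (List.range' (26 * q) (26 + r)).map pvPart := by
      rw [← List.map_append, List.range'_append_1]
    have := ih (26 + r)
    rw [show 26 * q + (26 + r) = 26 * (q + 1) + r from by ring] at this
    calc _ = ((List.range q).map (fun k => ((List.range' (26 * k) 26).map pvPart).flatten)).flatten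
          ++ (((List.range' (26 * q) 26).map pvPart).flatten
              ++ ((List.range' (26 * (q + 1)) r).map pvPart).flatten) := by
            simp [List.append_assoc]
      _ = _ := by
            rw [← List.flatten_append, show 26 * (q + 1) = 26 * q + 26 from by ring, hsplit]
            exact this

theorem polyspand_eq (x : Int) : polyspand x = polyspand_alt x := by
  -- A's side: the list of parts after the fold
  have hrange : PySem.List.pyRange 0 (x + 1) 1
      = (List.range (x + 1).toNat).map (fun k : Nat => (k : Int)) := by
    by_cases h : 0 ≤ x + 1
    · have hx : x + 1 = (((x + 1).toNat : Nat) : Int) := by omega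
      calc PySem.List.pyRange 0 (x + 1) 1
          = PySem.List.pyRange 0 (((x + 1).toNat : Nat) : Int) 1 :=
            congrArg (fun t => PySem.List.pyRange 0 t 1) hx
        _ = _ := PySem.List.pyRange_zero_natCast _
    · have h0 : (x + 1).toNat = 0 := by omega
      rw [h0]
      simp only [List.range_zero, List.map_nil]
      exact PySem.List.pyRange_one_eq_nil (by omega)
  have hfold := pvFoldA ((List.range (x + 1).toNat).map (fun k : Nat => (k : Int))) 0
  simp only [List.length_map, List.length_range, Nat.zero_add] at hfold
  have hinit : pvStA 0 = ([], -1, 0) := by decide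
  set nt : Nat := (x + 1).toNat with hnt
  have hA : polyspand x
      = (String.ofList (((List.range' 0 nt).map pvPart).flatten), x + 1) := by
    simp only [polyspand, hrange, ← hinit, hfold]
    rw [pvJoin_nil_flatten]
    rfl
  by_cases hpos : x + 1 > 0
  case neg =>
    -- n ≤ 0: no parts on either side
    have h0 : nt = 0 := by omega
    simp only [polyspand_alt, if_neg hpos]
    rw [hA, h0]
    simp [PySem.Chars.join_nil, String.ofList]
  case pos =>
    have hxcast : x + 1 = ((nt : Nat) : Int) := by omega
    set q : Nat := nt / 26 with hq
    set r : Nat := nt % 26 with hr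
    have hfd : PySem.Int.floordiv (x + 1) 26 = (q : Int) := by
      rw [hxcast, show (26 : Int) = ((26 : Nat) : Int) from rfl, PySem.Int.floordiv_natCast]
    have hmd : PySem.Int.mod (x + 1) 26 = (r : Int) := by
      rw [hxcast, show (26 : Int) = ((26 : Nat) : Int) from rfl, PySem.Int.mod_natCast]
    have hblock : ∀ k : Nat, pvJoinEnd (pvSuffixB (k : Int)) pvLetters
        = ((List.range' (26 * k) 26).map pvPart).flatten := by
      intro k
      have hsuf : pvSuffixB (k : Int) = List.replicate k '\'' ++ ['^'] := by simp [pvSuffixB]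
      have hb := pvBlock_parts k 26 (le_refl 26)
      rw [show pvLetters.take 26 = pvLetters from by decide] at hb
      rw [pvJoinEnd_flatten _ _ (by simp [pvLetters]), hsuf, hb]
    have hpieces : (PySem.List.pyRange 0 ((q : Nat) : Int) 1).map
          (fun p => pvJoinEnd (pvSuffixB p) pvLetters)
        = (List.range q).map (fun k => ((List.range' (26 * k) 26).map pvPart).flatten) := by
      rw [PySem.List.pyRange_zero_natCast, List.map_map]
      exact List.map_congr_left (fun k _ => hblock k)
    have hrlt : r < 26 := Nat.mod_lt _ (by omega)
    have hqr : 26 * q + r = nt := by omega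
    simp only [polyspand_alt, if_pos hpos, hfd, hmd]
    rw [hA]
    by_cases hr0 : r = 0
    · simp only [hr0, Nat.cast_zero, ne_eq, not_true_eq_false, if_false]
      rw [hpieces, pvJoin_nil_flatten]
      have := pvParts_concat q 0
      simp only [List.range'_zero, List.map_nil, List.flatten_nil, List.append_nil] at this
      rw [this, show 26 * q + 0 = nt from by omega]
    · have hrne : ((r : Nat) : Int) ≠ 0 := by exact_mod_cast hr0
      simp only [ne_eq, hrne, not_false_eq_true, if_true]
      have htail : pvJoinEnd (pvSuffixB ((q : Nat) : Int)) (pvLetters.take ((r : Nat) : Int).toNat)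
          = ((List.range' (26 * q) r).map pvPart).flatten := by
        have hrt : ((r : Nat) : Int).toNat = r := by omega
        have hne : pvLetters.take r ≠ [] := by
          have : (pvLetters.take r).length = r := by simp [pvLetters]; omega
          intro hnil; rw [hnil] at this; simp at this; omega
        have hsuf : pvSuffixB ((q : Nat) : Int) = List.replicate q '\'' ++ ['^'] := by
          simp [pvSuffixB]
        rw [hrt, pvJoinEnd_flatten _ _ hne, hsuf, pvBlock_parts q r (by omega)]
      rw [hpieces, htail, pvJoin_nil_flatten, List.flatten_append]
      simp only [List.flatten_cons, List.flatten_nil, List.append_nil]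
      rw [pvParts_concat q r, hqr]

-- ===== VERDICT =====
theorem polyspand_spec : Claim_equal_polyspand := by
  intro x _
  unfold Spec_polyspand
  exact polyspand_eq x
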